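-- pv_equiv track=rewrite | github.com/Vortex-VK/EdgeSim | src/edgesim/planner.py | inflate_grid
-- ===== SOURCE A (Python) =====
-- from typing import List, Tuple, Set
--
-- Grid = List[List[int]]  # 0=free, 1=blocked
--
-- def inflate_grid(grid: Grid, inflate_cells: int) -> Grid:
-- 	"""Binary-dilate obstacles by a square structuring element of radius `inflate_cells`."""
-- 	if inflate_cells <= 0:
-- 		# Return a shallow copy to avoid accidental in-place edits
-- 		return [row[:] for row in grid]
-- 	H, W = len(grid), len(grid[0]) if grid else 0
-- 	out: Grid = [[0 for _ in range(W)] for _ in range(H)]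
-- 	r = inflate_cells
-- 	for y in range(H):
-- 		y0 = max(0, y - r); y1 = min(H - 1, y + r)
-- 		for x in range(W):
-- 			x0 = max(0, x - r); x1 = min(W - 1, x + r)
-- 			blocked = False
-- 			for jj in range(y0, y1 + 1):
-- 				if blocked: break
-- 				for ii in range(x0, x1 + 1):
-- 					if grid[jj][ii] == 1:
-- 						blocked = True
-- 						break
-- 			out[y][x] = 1 if blocked else 0
-- 	return out
-- ===== SOURCE B (Python) =====
-- # Binary dilation via a 2D prefix-sum (summed-area) table: each output cell is
-- # answered by one O(1) window-sum query instead of scanning the r x r window.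
-- def inflate_grid(grid, inflate_cells):
-- 	if inflate_cells <= 0:
-- 		return [row[:] for row in grid]
-- 	H, W = len(grid), len(grid[0]) if grid else 0
-- 	r = inflate_cells
-- 	# P[j][i] = number of obstacle cells in the sub-grid grid[:j][:i]
-- 	P = [[0] * (W + 1)]
-- 	for row in grid:
-- 		rp = [0]
-- 		s = 0
-- 		for v in row[:W]:
-- 			s += 1 if v == 1 else 0
-- 			rp.append(s)
-- 		P.append([a + b for a, b in zip(P[-1], rp)])
-- 	out = []
-- 	for y in range(H):
-- 		y0 = max(0, y - r); y1 = min(H - 1, y + r)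
-- 		row_out = []
-- 		for x in range(W):
-- 			x0 = max(0, x - r); x1 = min(W - 1, x + r)
-- 			s = P[y1 + 1][x1 + 1] - P[y0][x1 + 1] - P[y1 + 1][x0] + P[y0][x0]
-- 			row_out.append(1 if s > 0 else 0)
-- 		out.append(row_out)
-- 	return out
-- ===== Notes on version B (the rewrite author's own statement) =====
-- stated objective: faster
-- what changed: Replaces A's per-cell break-on-blocked scan of the whole (2r+1)x(2r+1) window by a 2D prefix-sum (summed-area) table built once, so each output cell is decided by one O(1) window-sum query.
-- outside the precondition, e.g. on inflate_grid([[1, 1], [1]], 1): A returns [[1, 1], [1, 1]], B raises IndexError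
import Mathlib
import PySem

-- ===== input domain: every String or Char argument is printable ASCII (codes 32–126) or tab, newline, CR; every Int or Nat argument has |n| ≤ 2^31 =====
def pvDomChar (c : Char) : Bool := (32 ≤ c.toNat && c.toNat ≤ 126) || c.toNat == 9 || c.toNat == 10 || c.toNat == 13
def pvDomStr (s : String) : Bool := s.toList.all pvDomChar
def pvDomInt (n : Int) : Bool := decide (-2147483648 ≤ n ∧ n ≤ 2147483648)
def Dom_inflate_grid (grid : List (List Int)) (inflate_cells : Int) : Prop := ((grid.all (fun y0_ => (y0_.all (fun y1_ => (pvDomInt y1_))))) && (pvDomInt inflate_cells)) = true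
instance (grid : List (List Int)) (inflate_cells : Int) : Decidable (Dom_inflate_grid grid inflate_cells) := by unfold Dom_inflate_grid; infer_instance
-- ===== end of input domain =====

-- B replaces A's per-cell scan of the whole (clamped) square window by a 2D prefix-sum
-- (summed-area) table answering each window occupancy query in O(1).

-- ===== PORT A =====
-- Literal transliteration of A: for r ≤ 0 a row-wise copy; otherwise, for each (y, x), a
-- break-on-blocked scan of the clamped window. grid[jj][ii] is ported with pyGetD: under
-- Pre_inflate_grid every index read is in range, exactly where the Python returns.
def inflate_grid (grid : List (List Int)) (inflate_cells : Int) : List (List Int) :=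
  if inflate_cells ≤ 0 then grid.map (fun row => row)
  else
    let H : Int := grid.length
    let W : Int := match grid with | [] => (0 : Int) | g0 :: _ => (g0.length : Int)
    let r := inflate_cells
    (PySem.List.pyRange 0 H 1).map (fun y =>
      let y0 := max 0 (y - r)
      let y1 := min (H - 1) (y + r)
      (PySem.List.pyRange 0 W 1).map (fun x =>
        let x0 := max 0 (x - r)
        let x1 := min (W - 1) (x + r)
        let blocked := (PySem.List.pyRange y0 (y1 + 1) 1).foldl (fun b jj =>
          if b then b
          else (PySem.List.pyRange x0 (x1 + 1) 1).foldl (fun b2 ii =>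
            if b2 then b2
            else PySem.List.pyGetD (PySem.List.pyGetD grid jj []) ii 0 == 1) b) false
        if blocked then (1 : Int) else 0))

-- ===== PORT B =====
-- rp = [0]; s = 0
-- for v in row[:W]: s += 1 if v == 1 else 0; rp.append(s)     (a left scan)
def rowScan (row : List Int) : List Int :=
  row.scanl (fun s v => s + (if v == 1 then (1 : Int) else 0)) 0

-- P = [[0] * (W + 1)]
-- for row in grid: P.append([a + b for a, b in zip(P[-1], rp)])  (a left scan over the rows)
def Ptab (grid : List (List Int)) (W : Int) : List (List Int) :=
  (grid.map (fun row => rowScan (PySem.List.slice row none (some W)))).scanl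
    (fun prev rp => (prev.zip rp).map (fun p => p.1 + p.2))
    (PySem.List.pyRepeat [0] (W + 1))

def inflate_grid_alt (grid : List (List Int)) (inflate_cells : Int) : List (List Int) :=
  if inflate_cells ≤ 0 then grid.map (fun row => row)
  else
    let H : Int := grid.length
    let W : Int := match grid with | [] => (0 : Int) | g0 :: _ => (g0.length : Int)
    let r := inflate_cells
    let P := Ptab grid W
    (PySem.List.pyRange 0 H 1).map (fun y =>
      let y0 := max 0 (y - r)
      let y1 := min (H - 1) (y + r)
      (PySem.List.pyRange 0 W 1).map (fun x =>
        let x0 := max 0 (x - r)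
        let x1 := min (W - 1) (x + r)
        let s := PySem.List.pyGetD (PySem.List.pyGetD P (y1 + 1) []) (x1 + 1) 0
               - PySem.List.pyGetD (PySem.List.pyGetD P y0 []) (x1 + 1) 0
               - PySem.List.pyGetD (PySem.List.pyGetD P (y1 + 1) []) x0 0
               + PySem.List.pyGetD (PySem.List.pyGetD P y0 []) x0 0
        if 0 < s then (1 : Int) else 0))

-- ===== PRECONDITION & SPEC =====
-- Pre_ excludes (for inflate_cells > 0 only) grids with a row shorter than the first row:
-- there A raises IndexError, except when an earlier obstacle happens to short-circuit the
-- scan before the missing cell is read (an accident of the break order); B raises on all of them.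
def Pre_inflate_grid (grid : List (List Int)) (inflate_cells : Int) : Prop :=
  0 < inflate_cells → ∀ row ∈ grid, (grid.headD []).length ≤ row.length
instance (grid : List (List Int)) (inflate_cells : Int) : Decidable (Pre_inflate_grid grid inflate_cells) := by unfold Pre_inflate_grid; infer_instance
def pvWitness_inflate_grid : List (List Int) × Int := ([[0, 1], [1, 0]], 1)
def Spec_inflate_grid (grid : List (List Int)) (inflate_cells : Int) (out : List (List Int)) : Prop := out = inflate_grid_alt grid inflate_cells
instance (grid : List (List Int)) (inflate_cells : Int) (out : List (List Int)) : Decidable (Spec_inflate_grid grid inflate_cells out) := by unfold Spec_inflate_grid; infer_instance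

-- ===== CLAIM (what is proved, stated in full; the proofs are below) =====
def Claim_equal_inflate_grid : Prop := ∀ (grid : List (List Int)) (inflate_cells : Int), Dom_inflate_grid grid inflate_cells → Pre_inflate_grid grid inflate_cells → Spec_inflate_grid grid inflate_cells (inflate_grid grid inflate_cells)

-- ===== LEMMAS AND PROOFS =====

-- 0/1 obstacle indicator and the grid cell both programs read at (j, i)
def ind (v : Int) : Int := if v == 1 then (1 : Int) else 0
def cell (grid : List (List Int)) (j i : Nat) : Int := (grid.getD j []).getD i 0

lemma ind_nonneg (v : Int) : 0 ≤ ind v := by unfold ind; split <;> omega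

lemma scanl_getD_zero {α β : Type} (f : β → α → β) (z : β) (l : List α) (d : β) :
    (List.scanl f z l).getD 0 d = z := by cases l <;> simp [List.scanl_nil, List.scanl_cons]

lemma scanl_getD_succ {α β : Type} (f : β → α → β) (z : β) (l : List α) (j : Nat) (d : β)
    (hj : j < l.length) :
    (List.scanl f z l).getD (j + 1) d = f ((List.scanl f z l).getD j d) l[j] := by
  induction l generalizing z j with
  | nil => simp at hj
  | cons a t ih =>
    cases j with
    | zero => simp [List.scanl_cons]
    | succ k =>
      simp only [List.scanl_cons, List.getD_cons_succ, List.getElem_cons_succ]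
      exact ih (f z a) k (by simpa using hj)

lemma rowScan_getD (row : List Int) (k : Nat) (hk : k ≤ row.length) :
    (rowScan row).getD k 0 = ∑ i ∈ Finset.range k, ind (row.getD i 0) := by
  induction k with
  | zero => simp [rowScan]
  | succ k ih =>
    rw [rowScan, scanl_getD_succ _ _ _ _ _ (by omega), Finset.sum_range_succ, ← rowScan,
      ih (by omega), List.getD_eq_getElem _ _ (by omega)]
    rfl

lemma rowScan_length (row : List Int) : (rowScan row).length = row.length + 1 := by
  simp [rowScan, List.length_scanl]

lemma zipAdd_length (a b : List Int) :
    ((a.zip b).map (fun p => p.1 + p.2)).length = min a.length b.length := by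
  simp [List.length_zip]

lemma zipAdd_getD (a b : List Int) (k : Nat) (ha : k < a.length) (hb : k < b.length) :
    ((a.zip b).map (fun p => p.1 + p.2)).getD k 0 = a.getD k 0 + b.getD k 0 := by
  rw [List.getD_eq_getElem _ _ (by simp [List.length_zip]; omega),
    List.getD_eq_getElem _ _ ha, List.getD_eq_getElem _ _ hb]
  simp

-- combined length + value invariant of the prefix table
lemma Ptab_len (grid : List (List Int)) (Wn : Nat)
    (hrows : ∀ row ∈ grid, Wn ≤ row.length) (j : Nat) (hj : j ≤ grid.length) :
    ((Ptab grid (Wn : Int)).getD j []).length = Wn + 1 := by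
  induction j with
  | zero =>
    rw [Ptab, scanl_getD_zero, PySem.List.pyRepeat_singleton]
    simp
  | succ k ih =>
    rw [Ptab, scanl_getD_succ _ _ _ _ _ (by simpa using (by omega : k < grid.length)), ← Ptab,
      zipAdd_length, ih (by omega)]
    have hg : k < grid.length := by omega
    rw [List.getElem_map, rowScan_length, PySem.List.slice_to_natCast]
    have := hrows grid[k] (List.getElem_mem hg)
    simp [List.length_take]
    omega

lemma Ptab_getD (grid : List (List Int)) (Wn : Nat)
    (hrows : ∀ row ∈ grid, Wn ≤ row.length) (j k : Nat)
    (hj : j ≤ grid.length) (hk : k ≤ Wn) :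
    ((Ptab grid (Wn : Int)).getD j []).getD k 0
      = ∑ j' ∈ Finset.range j, ∑ i ∈ Finset.range k, ind (cell grid j' i) := by
  induction j with
  | zero =>
    rw [Ptab, scanl_getD_zero, PySem.List.pyRepeat_singleton]
    simp
  | succ m ih =>
    have hg : m < grid.length := by omega
    have hWrow : Wn ≤ grid[m].length := hrows grid[m] (List.getElem_mem hg)
    rw [Ptab, scanl_getD_succ _ _ _ _ _ (by simpa using hg), ← Ptab]
    have hlen : ((Ptab grid (Wn : Int)).getD m []).length = Wn + 1 := Ptab_len grid Wn hrows m (by omega)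
    rw [List.getElem_map, PySem.List.slice_to_natCast]
    have htk : (grid[m].take Wn).length = Wn := by simp [List.length_take]; omega
    rw [zipAdd_getD _ _ k (by omega) (by rw [rowScan_length, htk]; omega)]
    rw [ih (by omega), rowScan_getD _ _ (by omega), Finset.sum_range_succ]
    congr 1
    apply Finset.sum_congr rfl
    intro i hi
    have hik : i < Wn := by have := Finset.mem_range.mp hi; omega
    rw [List.getD_eq_getElem _ _ (by omega : i < (grid[m].take Wn).length), List.getElem_take]
    rw [cell, List.getD_eq_getElem _ _ hg, List.getD_eq_getElem _ _ (by omega)]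

lemma window_sum (F : Nat → Nat → Int) (a b c d : Nat) (hab : a ≤ b) (hcd : c ≤ d) :
    (∑ j ∈ Finset.range b, ∑ i ∈ Finset.range d, F j i)
      - (∑ j ∈ Finset.range a, ∑ i ∈ Finset.range d, F j i)
      - (∑ j ∈ Finset.range b, ∑ i ∈ Finset.range c, F j i)
      + (∑ j ∈ Finset.range a, ∑ i ∈ Finset.range c, F j i)
      = ∑ j ∈ Finset.Ico a b, ∑ i ∈ Finset.Ico c d, F j i := by
  have hin : ∀ j, ∑ i ∈ Finset.Ico c d, F j i
      = (∑ i ∈ Finset.range d, F j i) - (∑ i ∈ Finset.range c, F j i) := by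
    intro j; rw [Finset.sum_Ico_eq_sub _ hcd]
  calc (∑ j ∈ Finset.range b, ∑ i ∈ Finset.range d, F j i)
      - (∑ j ∈ Finset.range a, ∑ i ∈ Finset.range d, F j i)
      - (∑ j ∈ Finset.range b, ∑ i ∈ Finset.range c, F j i)
      + (∑ j ∈ Finset.range a, ∑ i ∈ Finset.range c, F j i)
      = (∑ j ∈ Finset.Ico a b, ∑ i ∈ Finset.range d, F j i)
        - (∑ j ∈ Finset.Ico a b, ∑ i ∈ Finset.range c, F j i) := by
        rw [Finset.sum_Ico_eq_sub _ hab, Finset.sum_Ico_eq_sub _ hab]; ring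
    _ = ∑ j ∈ Finset.Ico a b, ∑ i ∈ Finset.Ico c d, F j i := by
        rw [← Finset.sum_sub_distrib]; exact Finset.sum_congr rfl (fun j _ => (hin j).symm)

lemma pos_iff_exists (grid : List (List Int)) (a b c d : Nat) :
    (0 < ∑ j ∈ Finset.Ico a b, ∑ i ∈ Finset.Ico c d, ind (cell grid j i))
      ↔ ∃ j, (a ≤ j ∧ j < b) ∧ ∃ i, (c ≤ i ∧ i < d) ∧ cell grid j i = 1 := by
  have hnn : ∀ j ∈ Finset.Ico a b, 0 ≤ ∑ i ∈ Finset.Ico c d, ind (cell grid j i) :=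
    fun j _ => Finset.sum_nonneg (fun i _ => ind_nonneg _)
  have hz : (∑ j ∈ Finset.Ico a b, ∑ i ∈ Finset.Ico c d, ind (cell grid j i)) = 0
      ↔ ¬ ∃ j, (a ≤ j ∧ j < b) ∧ ∃ i, (c ≤ i ∧ i < d) ∧ cell grid j i = 1 := by
    rw [Finset.sum_eq_zero_iff_of_nonneg hnn]
    constructor
    · rintro h ⟨j, hj, i, hi, hv⟩
      have := h j (Finset.mem_Ico.mpr hj)
      rw [Finset.sum_eq_zero_iff_of_nonneg (fun i _ => ind_nonneg _)] at this
      have := this i (Finset.mem_Ico.mpr hi)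
      simp [ind, hv] at this
    · intro h j hj
      rw [Finset.sum_eq_zero_iff_of_nonneg (fun i _ => ind_nonneg _)]
      intro i hi
      by_contra hne
      refine h ⟨j, by simpa using Finset.mem_Ico.mp hj, i, by simpa using Finset.mem_Ico.mp hi, ?_⟩
      unfold ind at hne
      by_contra hc
      simp [hc] at hne
  have h0 : 0 ≤ ∑ j ∈ Finset.Ico a b, ∑ i ∈ Finset.Ico c d, ind (cell grid j i) :=
    Finset.sum_nonneg hnn
  constructor
  · intro h
    by_contra hc
    have := hz.mpr hc
    omega
  · intro h
    have : (∑ j ∈ Finset.Ico a b, ∑ i ∈ Finset.Ico c d, ind (cell grid j i)) ≠ 0 :=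
      fun e => (hz.mp e) h
    omega

lemma foldl_break_any {α : Type} (g : α → Bool) (l : List α) (b : Bool) :
    l.foldl (fun acc t => if acc then acc else g t) b = (b || l.any g) := by
  induction l generalizing b with
  | nil => simp
  | cons a t ih => cases b <;> simp [ih]

lemma nested_break_any (g : Int → Int → Bool) (l1 l2 : List Int) :
    l1.foldl (fun b jj =>
      if b then b
      else l2.foldl (fun b2 ii => if b2 then b2 else g jj ii) b) false
    = l1.any (fun jj => l2.any (g jj)) := by
  have hfun : (fun (b : Bool) jj =>
      if b then b else l2.foldl (fun b2 ii => if b2 then b2 else g jj ii) b)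
      = (fun b jj => if b then b else l2.any (g jj)) := by
    funext b jj; cases b <;> simp [foldl_break_any]
  rw [hfun, foldl_break_any]
  simp

lemma length_Ptab (grid : List (List Int)) (W : Int) :
    (Ptab grid W).length = grid.length + 1 := by
  simp [Ptab, List.length_scanl]

lemma entry_eq (grid : List (List Int)) (Wn : Nat) (r y x : Int)
    (hrows : ∀ row ∈ grid, Wn ≤ row.length) (hr : 0 < r)
    (hy0 : 0 ≤ y) (hy1 : y < (grid.length : Int))
    (hx0 : 0 ≤ x) (hx1 : x < (Wn : Int)) :
    (if (PySem.List.pyRange (max 0 (y - r)) (min ((grid.length : Int) - 1) (y + r) + 1) 1).foldl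
        (fun b jj =>
          if b then b
          else (PySem.List.pyRange (max 0 (x - r)) (min ((Wn : Int) - 1) (x + r) + 1) 1).foldl
            (fun b2 ii =>
              if b2 then b2
              else PySem.List.pyGetD (PySem.List.pyGetD grid jj []) ii 0 == 1) b) false
      then (1 : Int) else 0)
    = (if 0 < PySem.List.pyGetD (PySem.List.pyGetD (Ptab grid (Wn : Int)) (min ((grid.length : Int) - 1) (y + r) + 1) []) (min ((Wn : Int) - 1) (x + r) + 1) 0
           - PySem.List.pyGetD (PySem.List.pyGetD (Ptab grid (Wn : Int)) (max 0 (y - r)) []) (min ((Wn : Int) - 1) (x + r) + 1) 0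
           - PySem.List.pyGetD (PySem.List.pyGetD (Ptab grid (Wn : Int)) (min ((grid.length : Int) - 1) (y + r) + 1) []) (max 0 (x - r)) 0
           + PySem.List.pyGetD (PySem.List.pyGetD (Ptab grid (Wn : Int)) (max 0 (y - r)) []) (max 0 (x - r)) 0
      then (1 : Int) else 0) := by
  set H : Int := (grid.length : Int) with hH
  set y0 : Int := max 0 (y - r) with hy0d
  set y1 : Int := min (H - 1) (y + r) with hy1d
  set x0 : Int := max 0 (x - r) with hx0d
  set x1 : Int := min ((Wn : Int) - 1) (x + r) with hx1d
  have hb1 : 0 ≤ y0 ∧ y0 ≤ y ∧ y ≤ y1 ∧ y1 + 1 ≤ H := by omega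
  have hb2 : 0 ≤ x0 ∧ x0 ≤ x ∧ x ≤ x1 ∧ x1 + 1 ≤ (Wn : Int) := by omega
  -- name the four nat corners
  set a : Nat := y0.toNat with ha
  set b : Nat := (y1 + 1).toNat with hb
  set c : Nat := x0.toNat with hc
  set d : Nat := (x1 + 1).toNat with hd
  -- rewrite the B side into the window sum
  have hPg : ∀ (t : Int), 0 ≤ t → t ≤ H → ∀ (u : Int), 0 ≤ u → u ≤ (Wn : Int) →
      PySem.List.pyGetD (PySem.List.pyGetD (Ptab grid (Wn : Int)) t []) u 0
        = ∑ j' ∈ Finset.range t.toNat, ∑ i ∈ Finset.range u.toNat, ind (cell grid j' i) := by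
    intro t ht0 htH u hu0 huW
    rw [PySem.List.pyGetD_eq_getElem _ _ ht0 (by rw [length_Ptab]; push_cast; omega)]
    rw [← List.getD_eq_getElem _ ([]) (by rw [length_Ptab]; omega)]
    rw [PySem.List.pyGetD_eq_getElem _ _ hu0
      (by rw [Ptab_len grid Wn hrows t.toNat (by omega)]; push_cast; omega)]
    rw [← List.getD_eq_getElem _ (0:Int) (by rw [Ptab_len grid Wn hrows t.toNat (by omega)]; omega)]
    exact Ptab_getD grid Wn hrows t.toNat u.toNat (by omega) (by omega)
  rw [hPg (y1+1) (by omega) (by omega) (x1+1) (by omega) (by omega),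
      hPg y0 (by omega) (by omega) (x1+1) (by omega) (by omega),
      hPg (y1+1) (by omega) (by omega) x0 (by omega) (by omega),
      hPg y0 (by omega) (by omega) x0 (by omega) (by omega)]
  rw [window_sum _ a b c d (by omega) (by omega)]
  -- rewrite the A side into the existential
  rw [nested_break_any]
  by_cases hex : ∃ j, (a ≤ j ∧ j < b) ∧ ∃ i, (c ≤ i ∧ i < d) ∧ cell grid j i = 1
  · rw [if_pos ((pos_iff_exists grid a b c d).mpr hex), if_pos]
    rw [List.any_eq_true]
    obtain ⟨j, hj, i, hi, hv⟩ := hex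
    refine ⟨(j : Int), PySem.List.mem_pyRange_one.mpr (by omega), ?_⟩
    rw [List.any_eq_true]
    refine ⟨(i : Int), PySem.List.mem_pyRange_one.mpr (by omega), ?_⟩
    have hjl : j < grid.length := by omega
    have hil : i < (grid[j]).length := by
      have := hrows grid[j] (List.getElem_mem hjl); omega
    have e1 : PySem.List.pyGetD grid (j : Int) [] = grid[j] := by
      rw [PySem.List.pyGetD_eq_getElem grid _ (by omega) (by omega)]
      simp
    rw [e1, PySem.List.pyGetD_eq_getElem grid[j] _ (by omega) (by omega)]
    simp only [Int.toNat_natCast]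
    rw [cell, List.getD_eq_getElem _ _ hjl, List.getD_eq_getElem _ _ hil] at hv
    simp [hv]
  · rw [if_neg (fun hp => hex ((pos_iff_exists grid a b c d).mp hp)), if_neg]
    intro hany
    apply hex
    rw [List.any_eq_true] at hany
    obtain ⟨jj, hjm, hrest⟩ := hany
    rw [List.any_eq_true] at hrest
    obtain ⟨ii, him, hv⟩ := hrest
    have hjb := PySem.List.mem_pyRange_one.mp hjm
    have hib := PySem.List.mem_pyRange_one.mp him
    have hjl : jj.toNat < grid.length := by omega
    have hil : ii.toNat < (grid[jj.toNat]).length := by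
      have := hrows grid[jj.toNat] (List.getElem_mem hjl); omega
    refine ⟨jj.toNat, by omega, ii.toNat, by omega, ?_⟩
    have e1 : PySem.List.pyGetD grid jj [] = grid[jj.toNat] := by
      rw [PySem.List.pyGetD_eq_getElem grid _ (by omega) (by omega)]
    rw [e1, PySem.List.pyGetD_eq_getElem grid[jj.toNat] _ (by omega) (by omega)] at hv
    rw [cell, List.getD_eq_getElem _ _ hjl, List.getD_eq_getElem _ _ hil]
    simpa using hv


theorem inflate_grid_spec : Claim_equal_inflate_grid := by
  intro grid r hdom hpre
  unfold Spec_inflate_grid inflate_grid inflate_grid_alt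
  by_cases hr : r ≤ 0
  · simp only [if_pos hr]
  · simp only [if_neg hr]
    cases grid with
    | nil => simp
    | cons g0 gs =>
      have hrows : ∀ row ∈ g0 :: gs, g0.length ≤ row.length := by
        intro row hrow
        simpa using hpre (by omega) row hrow
      apply List.map_congr_left
      intro y hy
      apply List.map_congr_left
      intro x hx
      have hym := PySem.List.mem_pyRange_one.mp hy
      have hxm := PySem.List.mem_pyRange_one.mp hx
      exact entry_eq (g0 :: gs) g0.length r y x hrows (by omega) hym.1 hym.2 hxm.1 hxm.2
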